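-- pv_equiv track=rewrite | github.com/bennetthylen/storymap-relationship-graph | scripts/layout_storymap_radial.py | collect_children
-- ===== SOURCE A (Python) =====
-- from collections import defaultdict, deque
--
-- def collect_children(edges: list) -> dict[str, list[str]]:
--     ch: dict[str, list[str]] = defaultdict(list)
--     for e in edges:
--         s = e.get("source")
--         t = e.get("target")
--         if not s or not t or s == t:
--             continue
--         ch[s].append(t)
--     for k in ch:
--         ch[k] = sorted(set(ch[k]))
--     return dict(ch)
-- ===== SOURCE B (Python) =====
-- def collect_children(edges: list) -> dict[str, list[str]]:
--     pairs = []
--     for e in edges: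
--         s = e.get("source")
--         t = e.get("target")
--         if s and t and s != t:
--             pairs.append((s, t))
--     keys = list(dict.fromkeys(s for s, _ in pairs))
--     return {k: sorted({t for s, t in pairs if s == k}) for k in keys}
-- ===== Notes on version B (the rewrite author's own statement) =====
-- stated objective: alternative
-- what changed: B replaces defaultdict accumulation with a flat pass collecting valid (source,target) pairs, an ordered dedup of sources, and a per-key comprehension producing sorted deduplicated targets.
import Mathlib
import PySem

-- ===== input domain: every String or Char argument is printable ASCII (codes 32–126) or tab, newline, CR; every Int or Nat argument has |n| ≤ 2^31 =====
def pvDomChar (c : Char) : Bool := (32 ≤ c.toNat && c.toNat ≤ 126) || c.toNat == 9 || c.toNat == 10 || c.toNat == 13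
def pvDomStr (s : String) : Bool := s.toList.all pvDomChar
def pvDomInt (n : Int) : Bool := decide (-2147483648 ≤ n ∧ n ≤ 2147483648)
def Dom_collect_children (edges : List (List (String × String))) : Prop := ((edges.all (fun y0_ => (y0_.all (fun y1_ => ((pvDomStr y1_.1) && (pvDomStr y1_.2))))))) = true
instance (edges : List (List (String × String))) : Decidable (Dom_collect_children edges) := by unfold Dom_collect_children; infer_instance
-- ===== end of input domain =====

-- B replaces defaultdict accumulation with pairs-list + ordered key dedup + per-key scan; return values proved equal (same insertion-order keys).

-- ===== PORT A =====
-- one edge: e.get("source"), e.get("target"), the 'not s or not t or s == t' skip, else ch[s].append(t)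
def cc_step (d : PySem.Dict String (List String)) (e : List (String × String)) :
    PySem.Dict String (List String) :=
  match (PySem.Dict.mk e).get? "source", (PySem.Dict.mk e).get? "target" with
  | some s, some t =>
      if s = "" || t = "" || s = t then d else d.modify s [] (· ++ [t])
  | _, _ => d

def collect_children (edges : List (List (String × String))) : List (String × List String) :=
  let ch := edges.foldl cc_step PySem.Dict.empty
  -- for k in ch: ch[k] = sorted(set(ch[k])); then dict(ch) — items in place
  ch.items.map (fun p => (p.1, PySem.List.sorted (PySem.Set.ofList p.2) (fun x => x) false))

-- ===== PORT B =====
-- the valid (source, target) pairs, in edge order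
def cc_pairs (edges : List (List (String × String))) : List (String × String) :=
  edges.foldl (fun acc e =>
    match (PySem.Dict.mk e).get? "source", (PySem.Dict.mk e).get? "target" with
    | some s, some t =>
        if s ≠ "" && t ≠ "" && s ≠ t then acc ++ [(s, t)] else acc
    | _, _ => acc) []

def collect_children_alt (edges : List (List (String × String))) : List (String × List String) :=
  let pairs := cc_pairs edges
  let keys := PySem.List.dedup (pairs.map (·.1))
  keys.map (fun k =>
    (k, PySem.List.sorted
          (PySem.Set.ofList ((pairs.filter (fun p => p.1 == k)).map (·.2)))
          (fun x => x) false))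

-- ===== PRECONDITION & SPEC =====
def Spec_collect_children (edges : List (List (String × String))) (out : List (String × List String)) : Prop := out = collect_children_alt edges
instance (edges : List (List (String × String))) (out : List (String × List String)) : Decidable (Spec_collect_children edges out) := by unfold Spec_collect_children; infer_instance

-- ===== CLAIM (what is proved, stated in full; the proofs are below) =====
def Claim_equal_collect_children : Prop := ∀ (edges : List (List (String × String))), Dom_collect_children edges → Spec_collect_children edges (collect_children edges)

-- ===== LEMMAS AND PROOFS =====

-- A's loop over edges is the modify-append loop over the valid pairs
def cc_one (e : List (String × String)) : List (String × String) :=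
  match (PySem.Dict.mk e).get? "source", (PySem.Dict.mk e).get? "target" with
  | some s, some t => if s ≠ "" && t ≠ "" && s ≠ t then [(s, t)] else []
  | _, _ => []

theorem cc_pairs_eq_flatMap (edges : List (List (String × String))) :
    cc_pairs edges = edges.flatMap cc_one := by
  unfold cc_pairs
  have h : (fun (acc : List (String × String)) e =>
      match (PySem.Dict.mk e).get? "source", (PySem.Dict.mk e).get? "target" with
      | some s, some t =>
          if s ≠ "" && t ≠ "" && s ≠ t then acc ++ [(s, t)] else acc
      | _, _ => acc) = fun acc e => acc ++ cc_one e := by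
    funext acc e
    unfold cc_one
    rcases (PySem.Dict.mk e).get? "source" with _ | s <;>
      rcases (PySem.Dict.mk e).get? "target" with _ | t <;> simp
    split <;> simp
  rw [h, PySem.List.foldl_append_eq_flatMap]
  simp

theorem cc_step_eq_foldl_one (d : PySem.Dict String (List String))
    (e : List (String × String)) :
    cc_step d e = (cc_one e).foldl (fun d p => d.modify p.1 [] (· ++ [p.2])) d := by
  unfold cc_step cc_one
  rcases (PySem.Dict.mk e).get? "source" with _ | s <;>
    rcases (PySem.Dict.mk e).get? "target" with _ | t <;> simp
  split
  · rename_i h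
    rw [if_neg]
    · simp
    · simp at h ⊢; tauto
  · rename_i h
    rw [if_pos]
    simp_all; tauto

theorem cc_foldl_eq_pairs (edges : List (List (String × String)))
    (d : PySem.Dict String (List String)) :
    edges.foldl cc_step d =
      (cc_pairs edges).foldl (fun d p => d.modify p.1 [] (· ++ [p.2])) d := by
  rw [cc_pairs_eq_flatMap]
  induction edges generalizing d with
  | nil => rfl
  | cons e es ih =>
      simp only [List.foldl_cons, List.flatMap_cons, List.foldl_append, ih,
        cc_step_eq_foldl_one]

theorem cc_items (pairs : List (String × String)) :
    (pairs.foldl (fun d p => d.modify p.1 [] (· ++ [p.2]))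
        (PySem.Dict.empty : PySem.Dict String (List String))).items =
      (PySem.List.dedup (pairs.map (·.1))).map
        (fun k => (k, (pairs.filter (fun p => p.1 == k)).map (·.2))) := by
  have hnd : (pairs.foldl (fun d p => d.modify p.1 [] (· ++ [p.2]))
      (PySem.Dict.empty : PySem.Dict String (List String))).keys.Nodup :=
    PySem.Dict.nodup_keys_foldl_modify_key pairs (·.1) [] (fun _ p => (· ++ [p.2]))
      PySem.Dict.empty PySem.Dict.nodup_keys_empty
  rw [PySem.Dict.items_eq_map_keys _ hnd []]
  rw [PySem.Dict.keys_foldl_modify_key]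
  simp [PySem.Dict.getD_foldl_modify_append, PySem.Set.update_nil_left]

-- ===== VERDICT (by name: the statement is the Claim_ definition above) =====
theorem collect_children_spec : Claim_equal_collect_children := by
  intro edges _
  unfold Spec_collect_children collect_children collect_children_alt
  simp only [cc_foldl_eq_pairs, cc_items, List.map_map, Function.comp_def]
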